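-- pv_equiv track=rewrite | github.com/shreeya109/Othello-AI-Game | OthelloKhelo.py | flip_checker
-- ===== SOURCE A (Python) =====
-- BOARD_SIZE = 8
--
-- def flip_checker(board, x, y, p_x, p_y, player):
--     x += p_x
--     y += p_y
--
--     if x >= BOARD_SIZE or x < 0 or y >= BOARD_SIZE or y < 0 or board[y][x] != -player:
--         return False
--
--     x += p_x
--     y += p_y
--
--     while 0 <= x < BOARD_SIZE and 0 <= y < BOARD_SIZE:
--         if board[y][x] == player:
--             return True
--         elif board[y][x] == 0:
--             break
--         x += p_x
--         y += p_y
--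
--     return False
-- ===== SOURCE B (Python) =====
-- BOARD_SIZE = 8
--
-- def flip_checker(board, x, y, p_x, p_y, player):
--     # Phase 1: materialize the values along the ray, nearest first.
--     ray = []
--     cx, cy = x + p_x, y + p_y
--     while 0 <= cx < BOARD_SIZE and 0 <= cy < BOARD_SIZE:
--         ray.append(board[cy][cx])
--         cx += p_x
--         cy += p_y
--     # Phase 2: judge the ray.
--     if not ray or ray[0] != -player:
--         return False
--     for v in ray[1:]:
--         if v == player:
--             return True
--         if v == 0:
--             return False
--     return False
-- ===== Notes on version B (the rewrite author's own statement) =====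
-- stated objective: alternative
-- what changed: B splits A's interleaved guard-plus-walk into two phases: it first materializes the list of cell values along the (p_x,p_y) ray, then judges that list with a pure scan, so all coordinate arithmetic lives in one place and the game rule in another.
-- outside the precondition, e.g. on flip_checker([[-1, 1]], -1, 0, 1, 0, 1): A returns True, B raises IndexError
import Mathlib
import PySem

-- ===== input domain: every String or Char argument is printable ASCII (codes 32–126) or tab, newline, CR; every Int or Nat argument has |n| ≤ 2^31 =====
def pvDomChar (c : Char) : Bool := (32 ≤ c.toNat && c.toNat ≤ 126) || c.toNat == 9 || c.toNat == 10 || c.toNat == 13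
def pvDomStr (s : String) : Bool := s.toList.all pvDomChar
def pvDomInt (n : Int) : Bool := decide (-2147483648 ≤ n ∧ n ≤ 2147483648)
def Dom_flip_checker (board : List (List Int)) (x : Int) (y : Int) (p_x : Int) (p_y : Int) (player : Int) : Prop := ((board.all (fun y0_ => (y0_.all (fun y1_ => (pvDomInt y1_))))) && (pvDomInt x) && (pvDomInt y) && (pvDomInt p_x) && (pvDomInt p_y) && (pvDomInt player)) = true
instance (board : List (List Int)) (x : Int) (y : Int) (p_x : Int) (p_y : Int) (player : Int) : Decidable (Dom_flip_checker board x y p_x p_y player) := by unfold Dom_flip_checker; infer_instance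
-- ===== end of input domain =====

-- B splits A's guard-plus-walk into ray extraction followed by a pure scan of the ray (alternative decomposition, same cost).

-- ===== PORT A =====
-- board[y][x]; Pre_ guarantees 0 ≤ x < 8 and 0 ≤ y < 8 on an 8×8 board, so both pyGet? are
-- some and the getD defaults are never used inside Pre_.
def pvCellA (board : List (List Int)) (x : Int) (y : Int) : Int :=
  (PySem.List.pyGet? ((PySem.List.pyGet? board y).getD []) x).getD 0

-- A's while-loop; fuel is only a totality guard: under Pre_ (direction ≠ (0,0)) the in-box
-- positions along the ray are at most 8 consecutive steps, so fuel 64 is never exhausted.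
def flipLoopA (board : List (List Int)) (player : Int) (p_x : Int) (p_y : Int) : Nat → Int → Int → Bool
  | 0, _, _ => false
  | f + 1, x, y =>
    if 0 ≤ x ∧ x < 8 ∧ 0 ≤ y ∧ y < 8 then
      if pvCellA board x y = player then true
      else if pvCellA board x y = 0 then false
      else flipLoopA board player p_x p_y f (x + p_x) (y + p_y)
    else false

def flip_checker (board : List (List Int)) (x : Int) (y : Int) (p_x : Int) (p_y : Int) (player : Int) : Bool :=
  if x + p_x ≥ 8 ∨ x + p_x < 0 ∨ y + p_y ≥ 8 ∨ y + p_y < 0 ∨ pvCellA board (x + p_x) (y + p_y) ≠ -player then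
    false
  else flipLoopA board player p_x p_y 64 (x + p_x + p_x) (y + p_y + p_y)

-- ===== PORT B =====
def pvCellB (board : List (List Int)) (cx : Int) (cy : Int) : Int :=
  (PySem.List.pyGet? ((PySem.List.pyGet? board cy).getD []) cx).getD 0

-- Phase 1 of Source B: collect the values along the ray; fuel is only a totality guard (see flipLoopA).
def pvBuildRay (board : List (List Int)) (p_x : Int) (p_y : Int) : Nat → Int → Int → List Int
  | 0, _, _ => []
  | f + 1, cx, cy =>
    if 0 ≤ cx ∧ cx < 8 ∧ 0 ≤ cy ∧ cy < 8 then
      pvCellB board cx cy :: pvBuildRay board p_x p_y f (cx + p_x) (cy + p_y)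
    else []

-- Phase 2 of Source B: the for-loop over ray[1:]
def pvJudge (player : Int) : List Int → Bool
  | [] => false
  | v :: rest => if v = player then true else if v = 0 then false else pvJudge player rest

def flip_checker_alt (board : List (List Int)) (x : Int) (y : Int) (p_x : Int) (p_y : Int) (player : Int) : Bool :=
  match pvBuildRay board p_x p_y 65 (x + p_x) (y + p_y) with
  | [] => false
  | v :: rest => if v ≠ -player then false else pvJudge player rest

-- ===== PRECONDITION & SPEC =====
-- When the first stepped cell lies outside the 8×8 box both programs answer False at once;
-- otherwise Pre_ requires the 8×8 Othello board the function is written for and a nonzero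
-- direction: on ragged boards A raises IndexError on a missing cell it reaches (or returns only
-- because it stops at a piece before the gap, where B, which reads the whole ray, raises), and
-- with p_x = p_y = 0 A loops forever whenever the first cell holds an opponent piece.
def Pre_flip_checker (board : List (List Int)) (x : Int) (y : Int) (p_x : Int) (p_y : Int) (player : Int) : Prop :=
  ¬(0 ≤ x + p_x ∧ x + p_x < 8 ∧ 0 ≤ y + p_y ∧ y + p_y < 8) ∨
    (board.length = 8 ∧ (∀ row ∈ board, row.length = 8) ∧ ¬(p_x = 0 ∧ p_y = 0))
instance (board : List (List Int)) (x : Int) (y : Int) (p_x : Int) (p_y : Int) (player : Int) : Decidable (Pre_flip_checker board x y p_x p_y player) := by unfold Pre_flip_checker; infer_instance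

def pvWitness_flip_checker : List (List Int) × Int × Int × Int × Int × Int :=
  ([[0,0,0,0,0,0,0,0],[0,0,0,0,0,0,0,0],[0,0,0,0,0,0,0,0],[0,0,0,-1,1,0,0,0],
    [0,0,0,1,-1,0,0,0],[0,0,0,0,0,0,0,0],[0,0,0,0,0,0,0,0],[0,0,0,0,0,0,0,0]], 2, 3, 1, 0, 1)

def Spec_flip_checker (board : List (List Int)) (x : Int) (y : Int) (p_x : Int) (p_y : Int) (player : Int) (out : Bool) : Prop := out = flip_checker_alt board x y p_x p_y player
instance (board : List (List Int)) (x : Int) (y : Int) (p_x : Int) (p_y : Int) (player : Int) (out : Bool) : Decidable (Spec_flip_checker board x y p_x p_y player out) := by unfold Spec_flip_checker; infer_instance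

-- ===== CLAIM (what is proved, stated in full; the proofs are below) =====
def Claim_equal_flip_checker : Prop := ∀ (board : List (List Int)) (x : Int) (y : Int) (p_x : Int) (p_y : Int) (player : Int), Dom_flip_checker board x y p_x p_y player → Pre_flip_checker board x y p_x p_y player → Spec_flip_checker board x y p_x p_y player (flip_checker board x y p_x p_y player)

-- ===== LEMMAS AND PROOFS =====

-- The two cell accessors are definitionally the same function.
theorem pvCellB_eq (board : List (List Int)) (x y : Int) : pvCellB board x y = pvCellA board x y := rfl

theorem pvBuildRay_succ (board : List (List Int)) (p_x p_y : Int) (f : Nat) (cx cy : Int) :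
    pvBuildRay board p_x p_y (f + 1) cx cy =
      if 0 ≤ cx ∧ cx < 8 ∧ 0 ≤ cy ∧ cy < 8 then
        pvCellB board cx cy :: pvBuildRay board p_x p_y f (cx + p_x) (cy + p_y)
      else [] := rfl

-- A's continuation loop equals judging the ray built from the same start, for any fuel.
theorem loopA_eq_judge (board : List (List Int)) (player p_x p_y : Int) :
    ∀ (f : Nat) (x y : Int),
      flipLoopA board player p_x p_y f x y = pvJudge player (pvBuildRay board p_x p_y f x y) := by
  intro f
  induction f with
  | zero => intro x y; rfl
  | succ f ih =>
    intro x y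
    rw [pvBuildRay_succ]
    by_cases h : 0 ≤ x ∧ x < 8 ∧ 0 ≤ y ∧ y < 8
    · rw [if_pos h]
      show _ = pvJudge player (pvCellB board x y :: _)
      simp only [flipLoopA, if_pos h, pvJudge, pvCellB_eq, ih]
      rfl
    · rw [if_neg h]
      simp only [flipLoopA, if_neg h, pvJudge]

theorem pvWitness_ok :
    Dom_flip_checker pvWitness_flip_checker.1 pvWitness_flip_checker.2.1 pvWitness_flip_checker.2.2.1
      pvWitness_flip_checker.2.2.2.1 pvWitness_flip_checker.2.2.2.2.1 pvWitness_flip_checker.2.2.2.2.2 ∧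
    Pre_flip_checker pvWitness_flip_checker.1 pvWitness_flip_checker.2.1 pvWitness_flip_checker.2.2.1
      pvWitness_flip_checker.2.2.2.1 pvWitness_flip_checker.2.2.2.2.1 pvWitness_flip_checker.2.2.2.2.2 := by
  decide

-- ===== VERDICT (by name: the statement is the Claim_ definition above) =====
theorem flip_checker_spec : Claim_equal_flip_checker := by
  intro board x y p_x p_y player _ _
  unfold Spec_flip_checker flip_checker flip_checker_alt
  rw [show (65 : Nat) = 64 + 1 from rfl, pvBuildRay_succ]
  by_cases h : 0 ≤ x + p_x ∧ x + p_x < 8 ∧ 0 ≤ y + p_y ∧ y + p_y < 8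
  · -- first stepped cell is inside the 8×8 box: the ray is nonempty
    rw [if_pos h]
    by_cases hv : pvCellA board (x + p_x) (y + p_y) = -player
    · have hg : ¬(x + p_x ≥ 8 ∨ x + p_x < 0 ∨ y + p_y ≥ 8 ∨ y + p_y < 0 ∨
          pvCellA board (x + p_x) (y + p_y) ≠ -player) := by
        simp only [not_or]
        exact ⟨by omega, by omega, by omega, by omega, not_not_intro hv⟩
      rw [if_neg hg]
      show flipLoopA board player p_x p_y 64 (x + p_x + p_x) (y + p_y + p_y) =
        if pvCellB board (x + p_x) (y + p_y) ≠ -player then false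
        else pvJudge player (pvBuildRay board p_x p_y 64 (x + p_x + p_x) (y + p_y + p_y))
      rw [pvCellB_eq, if_neg (not_not_intro hv)]
      exact loopA_eq_judge board player p_x p_y 64 (x + p_x + p_x) (y + p_y + p_y)
    · have hg : x + p_x ≥ 8 ∨ x + p_x < 0 ∨ y + p_y ≥ 8 ∨ y + p_y < 0 ∨
          pvCellA board (x + p_x) (y + p_y) ≠ -player :=
        Or.inr (Or.inr (Or.inr (Or.inr hv)))
      rw [if_pos hg]
      show false =
        if pvCellB board (x + p_x) (y + p_y) ≠ -player then false
        else pvJudge player (pvBuildRay board p_x p_y 64 (x + p_x + p_x) (y + p_y + p_y))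
      rw [pvCellB_eq, if_pos hv]
  · -- first stepped cell is outside the box: A's guard fires and B's ray is empty
    have hg : x + p_x ≥ 8 ∨ x + p_x < 0 ∨ y + p_y ≥ 8 ∨ y + p_y < 0 ∨
        pvCellA board (x + p_x) (y + p_y) ≠ -player := by omega
    rw [if_pos hg, if_neg h]
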